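-- pv_equiv track=rewrite | github.com/TGWaffles/Utils | src/helpers/spotify_helper.py | transform_duration_to_ms
-- ===== SOURCE A (Python) =====
-- def transform_duration_to_ms(duration_string):
--     total_ms = 0
--     split_duration = duration_string.split(":")
--     for index, num in enumerate(split_duration[::-1]):
--         if index == 0:
--             total_ms += int(num) * 1000
--         elif index == 1:
--             total_ms += int(num) * 60000
--         else:
--             total_ms += int(num) * 3600000
--     return total_ms
-- ===== SOURCE B (Python) =====
-- def transform_duration_to_ms(duration_string):
--     total_seconds = 0
--     for part in duration_string.split(":"):
--         total_seconds = total_seconds * 60 + int(part)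
--     return total_seconds * 1000
-- ===== Notes on version B (the rewrite author's own statement) =====
-- stated objective: idiomatic
-- what changed: Replaces the reversed-enumerate loop with a per-index weight branch by a single forward Horner pass in base 60 (total = total*60 + int(part), then *1000); Pre_ excludes strings with a non-integer segment (int() raises ValueError) and strings with more than three colon-separated segments, a corner an HH:MM:SS converter leaves unspecified, where A weights every extra leading segment as hours while B carries in base 60 — both readings are defensible and neither is specified.
-- outside the precondition, e.g. on transform_duration_to_ms('1:2:3:4'): A returns 10984000, B returns 223384000
import Mathlib
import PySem

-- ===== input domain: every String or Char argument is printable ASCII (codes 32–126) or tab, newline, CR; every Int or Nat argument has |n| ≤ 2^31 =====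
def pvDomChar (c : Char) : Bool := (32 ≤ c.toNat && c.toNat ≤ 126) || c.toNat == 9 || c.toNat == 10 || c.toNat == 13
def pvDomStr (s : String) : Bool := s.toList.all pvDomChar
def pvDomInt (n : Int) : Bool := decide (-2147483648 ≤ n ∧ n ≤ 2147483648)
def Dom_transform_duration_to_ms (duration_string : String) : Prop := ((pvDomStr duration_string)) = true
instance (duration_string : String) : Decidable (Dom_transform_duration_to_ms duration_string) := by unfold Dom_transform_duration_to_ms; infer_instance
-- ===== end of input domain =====

-- B replaces A's reversed-enumerate loop (branch per index) by a single forward Horner pass in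
-- base 60 (total = total*60 + int(part), then *1000); same O(n) cost, the idiomatic decomposition.


-- ===== PORT A =====
-- int(num) is PySem.Int.ofStr?; it is none exactly where Python raises ValueError — those
-- inputs are excluded by Pre_ below, so the .getD 0 default is never reached under Pre_.
def transform_duration_to_ms (duration_string : String) : Int :=
  let split_duration := (PySem.Str.split? duration_string ":").getD []
  let rev := (PySem.List.slice? split_duration none none (-1)).getD []
  (PySem.List.enumerate rev).foldl
    (fun total_ms p =>
      if p.1 = 0 then total_ms + ((PySem.Int.ofStr? p.2).getD 0) * 1000
      else if p.1 = 1 then total_ms + ((PySem.Int.ofStr? p.2).getD 0) * 60000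
      else total_ms + ((PySem.Int.ofStr? p.2).getD 0) * 3600000) 0

-- ===== PORT B =====
def transform_duration_to_ms_alt (duration_string : String) : Int :=
  let parts := (PySem.Str.split? duration_string ":").getD []
  (parts.foldl (fun total_seconds part =>
      total_seconds * 60 + (PySem.Int.ofStr? part).getD 0) 0) * 1000

-- ===== PRECONDITION & SPEC =====
-- Pre_ excludes (a) inputs where int(segment) raises ValueError in A, and (b) inputs with more
-- than three colon-separated segments, a corner an HH:MM:SS converter leaves unspecified, where
-- A weights every extra leading segment as hours while B carries in base 60 — both defensible.
def Pre_transform_duration_to_ms (duration_string : String) : Prop :=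
  (∀ p ∈ (PySem.Str.split? duration_string ":").getD [], (PySem.Int.ofStr? p).isSome = true)
  ∧ ((PySem.Str.split? duration_string ":").getD []).length ≤ 3
instance (duration_string : String) : Decidable (Pre_transform_duration_to_ms duration_string) := by unfold Pre_transform_duration_to_ms; infer_instance
def pvWitness_transform_duration_to_ms : String := "1:02:03"

def Spec_transform_duration_to_ms (duration_string : String) (out : Int) : Prop := out = transform_duration_to_ms_alt duration_string
instance (duration_string : String) (out : Int) : Decidable (Spec_transform_duration_to_ms duration_string out) := by unfold Spec_transform_duration_to_ms; infer_instance

-- ===== CLAIM (what is proved, stated in full; the proofs are below) =====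
def Claim_equal_transform_duration_to_ms : Prop := ∀ (duration_string : String), Dom_transform_duration_to_ms duration_string → Pre_transform_duration_to_ms duration_string → Spec_transform_duration_to_ms duration_string (transform_duration_to_ms duration_string)

-- ===== LEMMAS AND PROOFS =====

-- Core identity on the split list l (length ≤ 3): A's fold over enumerate l.reverse equals
-- B's Horner fold, for any segment valuation g.
theorem pv_main (g : String → Int) (l : List String) (hlen : l.length ≤ 3) :
    (PySem.List.enumerate l.reverse).foldl
      (fun total_ms p =>
        if p.1 = 0 then total_ms + g p.2 * 1000
        else if p.1 = 1 then total_ms + g p.2 * 60000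
        else total_ms + g p.2 * 3600000) 0
    = (l.foldl (fun total_seconds part => total_seconds * 60 + g part) 0) * 1000 := by
  rcases l with _ | ⟨a, l⟩
  · simp [PySem.List.enumerate]
  rcases l with _ | ⟨b, l⟩
  · simp [PySem.List.enumerate_cons]
  rcases l with _ | ⟨c, l⟩
  · simp [PySem.List.enumerate_cons]; ring
  rcases l with _ | ⟨d, l⟩
  · simp only [List.reverse_cons, List.reverse_nil, List.nil_append, List.cons_append,
      List.foldl_cons, List.foldl_nil, PySem.List.enumerate_cons, PySem.List.enumerate_nil]
    norm_num; ring
  · simp at hlen; omega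

-- ===== VERDICT (by name: the statement is the Claim_ definition above) =====
theorem transform_duration_to_ms_spec : Claim_equal_transform_duration_to_ms := by
  intro s _ hpre
  show transform_duration_to_ms s = transform_duration_to_ms_alt s
  simp only [transform_duration_to_ms, transform_duration_to_ms_alt,
    PySem.List.slice?_none_none_neg_one, Option.getD_some]
  exact pv_main (fun p => (PySem.Int.ofStr? p).getD 0) _ hpre.2
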